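-- pv_equiv track=rewrite | github.com/EmileHbrt/Plm_comparaison | code/analyse/Seq_dist_plot.py | sequence_distribution
-- ===== SOURCE A (Python) =====
-- from collections import Counter
--
-- def sequence_distribution(filtered_sequences, min_bin, max_bin):
--     """
--     Plot a barplot focusing on the shortest sequences grouped by bins of 50.
--     """
--     bins = [length // 50 * 50 for length in filtered_sequences.values()]
--     bin_counts = Counter(bins)
--
--     sorted_bins = sorted(bin_counts.keys())
--     counts = [bin_counts[b] for b in sorted_bins]
--
--     filtered_bins = [b for b in sorted_bins if min_bin <= b <= max_bin]
--     filtered_counts = [bin_counts[b] for b in filtered_bins]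
--     filtered_bins.append(max_bin)
--     filtered_counts.append(sum(bin_counts[b] for b in sorted_bins if b > max_bin))
--
--     return filtered_bins, filtered_counts
-- ===== SOURCE B (Python) =====
-- def sequence_distribution(filtered_sequences, min_bin, max_bin):
--     """
--     Plot a barplot focusing on the shortest sequences grouped by bins of 50.
--     """
--     bs = sorted(length // 50 * 50 for length in filtered_sequences.values())
--     n = len(bs)
--     filtered_bins, filtered_counts = [], []
--     i = 0
--     while i < n and bs[i] <= max_bin:
--         b = bs[i]
--         j = i + 1
--         while j < n and bs[j] == b:
--             j += 1
--         if b >= min_bin: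
--             filtered_bins.append(b)
--             filtered_counts.append(j - i)
--         i = j
--     filtered_bins.append(max_bin)
--     filtered_counts.append(n - i)
--     return filtered_bins, filtered_counts
-- ===== Notes on version B (the rewrite author's own statement) =====
-- stated objective: alternative
-- what changed: B drops A's Counter hash-count plus sort-of-distinct-keys plus three filtering comprehensions and instead sorts all bin values and run-length-encodes the sorted list with a two-pointer scan, stopping at the first bin above max_bin so the remaining suffix length is the overflow count.
import Mathlib
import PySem

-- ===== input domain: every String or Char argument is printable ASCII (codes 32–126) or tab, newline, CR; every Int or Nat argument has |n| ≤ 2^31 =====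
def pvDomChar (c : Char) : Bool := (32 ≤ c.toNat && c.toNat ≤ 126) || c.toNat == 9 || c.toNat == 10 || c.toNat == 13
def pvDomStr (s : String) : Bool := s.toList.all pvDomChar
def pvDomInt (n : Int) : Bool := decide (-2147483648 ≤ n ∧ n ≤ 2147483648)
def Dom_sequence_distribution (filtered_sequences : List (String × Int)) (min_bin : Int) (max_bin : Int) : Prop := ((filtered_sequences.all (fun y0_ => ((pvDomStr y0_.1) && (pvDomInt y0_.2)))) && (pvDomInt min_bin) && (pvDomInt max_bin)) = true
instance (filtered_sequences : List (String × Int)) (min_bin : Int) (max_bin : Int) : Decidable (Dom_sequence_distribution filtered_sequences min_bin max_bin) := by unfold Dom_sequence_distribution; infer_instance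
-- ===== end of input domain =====

-- B replaces A's Counter hash-count + sort of the distinct keys + filtering comprehensions by a
-- different algorithm: sort ALL bin values, then run-length-encode the sorted list with a two-pointer
-- scan, stopping at the first value above max_bin (whose suffix length is the overflow count)
-- (objective: alternative). Return-value equivalence only; neither program mutates its argument.

-- ===== PORT A =====
def sequence_distribution (filtered_sequences : List (String × Int)) (min_bin : Int) (max_bin : Int) : List Int × List Int :=
  let bins := filtered_sequences.map (fun p => PySem.Int.floordiv p.2 50 * 50)
  let bin_counts := PySem.Dict.counter bins
  let sorted_bins := PySem.List.sorted bin_counts.keys (fun x => x) false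
  let _counts := sorted_bins.map (fun b => bin_counts.getD b 0)  -- A's unused `counts`
  let filtered_bins := sorted_bins.filter (fun b => decide (min_bin ≤ b) && decide (b ≤ max_bin))
  let filtered_counts := filtered_bins.map (fun b => bin_counts.getD b 0)
  (filtered_bins ++ [max_bin],
   filtered_counts ++ [(sorted_bins.filter (fun b => decide (max_bin < b))).foldl
     (fun acc b => acc + bin_counts.getD b 0) 0])

-- ===== PORT B =====
-- B's outer while loop over the sorted list: the remaining suffix bs[i:] is the recursion argument;
-- the inner while that advances j over the run is the takeWhile/dropWhile split of the tail.
def seqDistGroup (mn mx : Int) (s : List Int) : List Int × List Int × Int :=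
  match s with
  | [] => ([], [], 0)
  | b :: t =>
    if b ≤ mx then
      let run := t.takeWhile (fun x => x == b)
      let rest := t.dropWhile (fun x => x == b)
      let r := seqDistGroup mn mx rest
      if mn ≤ b then (b :: r.1, (1 + (run.length : Int)) :: r.2.1, r.2.2) else r
    else ([], [], ((b :: t).length : Int))
termination_by s.length
decreasing_by simpa using Nat.lt_succ_of_le (List.length_dropWhile_le _ t)

def sequence_distribution_alt (filtered_sequences : List (String × Int)) (min_bin : Int) (max_bin : Int) : List Int × List Int :=
  let bs := PySem.List.sorted (filtered_sequences.map (fun p => PySem.Int.floordiv p.2 50 * 50)) (fun x => x) false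
  let r := seqDistGroup min_bin max_bin bs
  (r.1 ++ [max_bin], r.2.1 ++ [r.2.2])

-- ===== PRECONDITION & SPEC =====
def Spec_sequence_distribution (filtered_sequences : List (String × Int)) (min_bin : Int) (max_bin : Int) (out : List Int × List Int) : Prop := out = sequence_distribution_alt filtered_sequences min_bin max_bin
instance (filtered_sequences : List (String × Int)) (min_bin : Int) (max_bin : Int) (out : List Int × List Int) : Decidable (Spec_sequence_distribution filtered_sequences min_bin max_bin out) := by unfold Spec_sequence_distribution; infer_instance

-- ===== CLAIM (what is proved, stated in full; the proofs are below) =====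
def Claim_equal_sequence_distribution : Prop := ∀ (filtered_sequences : List (String × Int)) (min_bin : Int) (max_bin : Int), Dom_sequence_distribution filtered_sequences min_bin max_bin → Spec_sequence_distribution filtered_sequences min_bin max_bin (sequence_distribution filtered_sequences min_bin max_bin)

-- ===== LEMMAS AND PROOFS =====

-- the distinct values of a sorted list, in order (what B's outer loop steps through)
def sortedDistinct (s : List Int) : List Int :=
  match s with
  | [] => []
  | b :: t => b :: sortedDistinct (t.dropWhile (fun x => x == b))
termination_by s.length
decreasing_by simpa using Nat.lt_succ_of_le (List.length_dropWhile_le _ t)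

theorem mem_sortedDistinct (s : List Int) (x : Int) : x ∈ sortedDistinct s ↔ x ∈ s := by
  induction s using sortedDistinct.induct with
  | case1 => simp [sortedDistinct]
  | case2 b t ih =>
    rw [sortedDistinct]
    constructor
    · intro h
      rcases List.mem_cons.mp h with h | h
      · simp [h]
      · have := (ih.mp h)
        exact List.mem_cons_of_mem _ ((List.dropWhile_sublist _).mem this)
    · intro h
      rcases List.mem_cons.mp h with h | h
      · simp [h]
      · rcases (List.takeWhile_append_dropWhile (p := fun x => x == b) (l := t)) ▸ h |> List.mem_append.mp with h | h
        · have : (x == b) = true := List.mem_takeWhile_imp (p := fun x => x == b) (l := t) h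
          simp [eq_of_beq this]
        · exact List.mem_cons_of_mem _ (ih.mpr h)

-- every element surviving the dropWhile of a run is strictly above the run's value
theorem lt_of_mem_dropWhile (b : Int) (t : List Int) (hpw : t.Pairwise (· ≤ ·))
    (hle : ∀ x ∈ t, b ≤ x) (x : Int) (hx : x ∈ t.dropWhile (fun x => x == b)) : b < x := by
  induction t with
  | nil => simp at hx
  | cons a t' ih =>
    by_cases hab : (a == b) = true
    · have hx' : x ∈ t'.dropWhile (fun x => x == b) := by
        rwa [show (a :: t').dropWhile (fun x => x == b) = t'.dropWhile (fun x => x == b) by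
          simp [hab]] at hx
      exact ih hpw.of_cons (fun y hy => hle y (List.mem_cons_of_mem _ hy)) hx'
    · rw [show (a :: t').dropWhile (fun x => x == b) = a :: t' by simp [hab]] at hx
      have hba : b < a := lt_of_le_of_ne (hle a (List.mem_cons_self)) (fun h => hab (by simp [h.symm]))
      rcases List.mem_cons.mp hx with h | h
      · omega
      · have : a ≤ x := (List.pairwise_cons.mp hpw).1 x h
        omega

theorem sortedDistinct_pairwise_lt (s : List Int) (hs : s.Pairwise (· ≤ ·)) :
    (sortedDistinct s).Pairwise (· < ·) := by
  induction s using sortedDistinct.induct with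
  | case1 => simp [sortedDistinct]
  | case2 b t ih =>
    rw [sortedDistinct]
    have ht := hs.of_cons
    have hle : ∀ x ∈ t, b ≤ x := (List.pairwise_cons.mp hs).1
    have hrest : (t.dropWhile (fun x => x == b)).Pairwise (· ≤ ·) := ht.sublist (List.dropWhile_sublist _)
    refine List.pairwise_cons.mpr ⟨?_, ih hrest⟩
    intro x hx
    exact lt_of_mem_dropWhile b t ht hle x ((mem_sortedDistinct _ x).mp hx)

-- B's loop on a sorted list computes: distinct in-range bins, their multiplicities, and the
-- number of elements above max_bin
theorem group_spec (mn mx : Int) (s : List Int) (hs : s.Pairwise (· ≤ ·)) :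
    seqDistGroup mn mx s =
      ((sortedDistinct s).filter (fun b => decide (mn ≤ b) && decide (b ≤ mx)),
       ((sortedDistinct s).filter (fun b => decide (mn ≤ b) && decide (b ≤ mx))).map
         (fun b => (s.count b : Int)),
       ((s.filter (fun b => decide (mx < b))).length : Int)) := by
  induction s using sortedDistinct.induct with
  | case1 => simp [seqDistGroup, sortedDistinct]
  | case2 b t ih =>
    have ht := hs.of_cons
    have hle : ∀ x ∈ t, b ≤ x := (List.pairwise_cons.mp hs).1
    set run := t.takeWhile (fun x => x == b) with hrun
    set rest := t.dropWhile (fun x => x == b) with hrest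
    have hsplit : t = run ++ rest := (List.takeWhile_append_dropWhile).symm
    have hrestpw : rest.Pairwise (· ≤ ·) := ht.sublist (List.dropWhile_sublist _)
    have hrestgt : ∀ x ∈ rest, b < x := fun x hx => lt_of_mem_dropWhile b t ht hle x hx
    have hrunall : ∀ x ∈ run, x = b := fun x hx => eq_of_beq (List.mem_takeWhile_imp (p := fun x => x == b) (l := t) hx)
    by_cases hbmx : b ≤ mx
    · rw [seqDistGroup, sortedDistinct, if_pos hbmx]
      dsimp only
      rw [← hrun, ← hrest, ih hrestpw]
      -- counts of elements of rest are unchanged by prepending b and its run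
      have hcnt : ∀ x ∈ sortedDistinct rest,
          ((b :: t).count x : Int) = (rest.count x : Int) := by
        intro x hx
        have hxrest := (mem_sortedDistinct _ x).mp hx
        have hxb : x ≠ b := by have := hrestgt x hxrest; omega
        have h0 : run.count x = 0 := List.count_eq_zero.mpr (fun h => hxb (hrunall x h))
        rw [hsplit]
        simp [List.count_cons, List.count_append, h0]
        omega
      have hmap : ((sortedDistinct rest).filter
            (fun b => decide (mn ≤ b) && decide (b ≤ mx))).map (fun x => (rest.count x : Int))
          = ((sortedDistinct rest).filter
            (fun b => decide (mn ≤ b) && decide (b ≤ mx))).map (fun x => (((b :: t).count x) : Int)) :=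
        List.map_congr_left (fun x hx => (hcnt x (List.mem_filter.mp hx).1).symm)
      -- the head's run disappears from the overflow filter
      have hQrun : run.filter (fun v => decide (mx < v)) = [] :=
        List.filter_eq_nil_iff.mpr (fun x hx => by
          have := hrunall x hx; simp [this]; omega)
      have hQ : (b :: t).filter (fun v => decide (mx < v)) = rest.filter (fun v => decide (mx < v)) := by
        rw [hsplit, List.filter_cons, List.filter_append, hQrun]
        simp [show ¬ mx < b by omega]
      -- the head's own count
      have hcntb : ((b :: t).count b : Int) = 1 + (run.length : Int) := by
        have h0 : rest.count b = 0 := List.count_eq_zero.mpr (fun h => by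
          have := hrestgt b h; omega)
        have h1 : run.count b = run.length := List.count_eq_length.mpr (fun x hx => by
          simp [hrunall x hx])
        rw [hsplit]
        simp [List.count_append, h0, h1]
        omega
      by_cases hbmn : mn ≤ b
      · have hPcons : (b :: sortedDistinct rest).filter (fun b => decide (mn ≤ b) && decide (b ≤ mx))
            = b :: (sortedDistinct rest).filter (fun b => decide (mn ≤ b) && decide (b ≤ mx)) := by
          rw [List.filter_cons]; simp [hbmn, hbmx]
        rw [if_pos hbmn, hQ, hPcons, List.map_cons, hcntb, ← hmap]
      · have hPcons : (b :: sortedDistinct rest).filter (fun b => decide (mn ≤ b) && decide (b ≤ mx))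
            = (sortedDistinct rest).filter (fun b => decide (mn ≤ b) && decide (b ≤ mx)) := by
          rw [List.filter_cons]; simp [hbmn]
        rw [if_neg hbmn, hQ, hPcons, ← hmap]
    · rw [seqDistGroup, if_neg hbmx]
      have hgt : ∀ x ∈ (b :: t), mx < x := by
        intro x hx
        rcases List.mem_cons.mp hx with h | h
        · omega
        · have := hle x h; omega
      have hP : (sortedDistinct (b :: t)).filter (fun b => decide (mn ≤ b) && decide (b ≤ mx)) = [] :=
        List.filter_eq_nil_iff.mpr (fun x hx => by
          have := hgt x ((mem_sortedDistinct _ x).mp hx)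
          simp; omega)
      have hQ : (b :: t).filter (fun v => decide (mx < v)) = b :: t :=
        List.filter_eq_self.mpr (fun x hx => by simp [hgt x hx])
      rw [hP, hQ]
      simp

-- a Nodup list holding exactly the elements of m: summing m.count over it gives m.length
theorem sum_count_over_nodup (ks m : List Int) (hnd : ks.Nodup)
    (hmem : ∀ x, x ∈ ks ↔ x ∈ m) :
    (ks.map (fun b => (m.count b : Int))).sum = (m.length : Int) := by
  have hperm : ks.Perm m.dedup := by
    rw [List.perm_ext_iff_of_nodup hnd (List.nodup_dedup m)]
    intro a; rw [hmem, List.mem_dedup]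
  calc (ks.map (fun b => (m.count b : Int))).sum
      = (m.dedup.map (fun b => (m.count b : Int))).sum := (hperm.map _).sum_eq
    _ = ((m.dedup.map (fun b => m.count b)).sum : Int) := by
        rw [Nat.cast_list_sum, List.map_map]; rfl
    _ = (m.length : Int) := by rw [List.sum_map_count_dedup_eq_length]

-- ===== VERDICT (by name: the statement is the Claim_ definition above) =====
theorem sequence_distribution_spec : Claim_equal_sequence_distribution := by
  intro fs mn mx _
  unfold Spec_sequence_distribution sequence_distribution sequence_distribution_alt
  simp only []
  set l : List Int := fs.map (fun p => PySem.Int.floordiv p.2 50 * 50) with hl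
  set s : List Int := PySem.List.sorted l (fun x => x) false with hs
  have hperm : s.Perm l := PySem.List.sorted_perm l _ false
  have hpw : s.Pairwise (· ≤ ·) := PySem.List.sorted_pairwise l (fun x => x)
  set S : List Int := PySem.List.sorted (PySem.Set.ofList l) (fun x => x) false with hS
  -- the distinct values of the sorted list ARE A's sorted keys
  have hSD : S = sortedDistinct s := by
    apply PySem.List.sorted_eq_of_perm_of_pairwise_lt
    · rw [List.perm_ext_iff_of_nodup
        ((sortedDistinct_pairwise_lt s hpw).imp ne_of_lt) (PySem.Set.nodup_ofList l)]
      intro a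
      rw [mem_sortedDistinct, PySem.Set.mem_ofList, PySem.List.mem_sorted]
    · exact sortedDistinct_pairwise_lt s hpw
  rw [group_spec mn mx s hpw, ← hSD]
  simp only [PySem.Dict.keys_counter, ← hS]
  refine Prod.ext rfl ?_
  have hcounts : (S.filter (fun b => decide (mn ≤ b) && decide (b ≤ mx))).map
        (fun b => (PySem.Dict.counter l).getD b 0)
      = (S.filter (fun b => decide (mn ≤ b) && decide (b ≤ mx))).map
        (fun b => (s.count b : Int)) :=
    List.map_congr_left (fun b _ => by
      rw [PySem.Dict.getD_counter, hperm.count_eq b])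
  have hov : (S.filter (fun b => decide (mx < b))).foldl
        (fun acc b => acc + (PySem.Dict.counter l).getD b 0) 0
      = ((s.filter (fun b => decide (mx < b))).length : Int) := by
    rw [PySem.List.foldl_add, zero_add]
    have hnd : (S.filter (fun b => decide (mx < b))).Nodup :=
      (((PySem.List.sorted_perm _ _ _).nodup_iff).mpr (PySem.Set.nodup_ofList l)).filter _
    have hcnt : ∀ b ∈ S.filter (fun b => decide (mx < b)),
        (PySem.Dict.counter l).getD b 0
          = ((s.filter (fun b => decide (mx < b))).count b : Int) := fun b hb => by
      rw [PySem.Dict.getD_counter, ← hperm.count_eq b,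
        List.count_filter (p := fun b => decide (mx < b)) (a := b) (l := s)
          (by exact_mod_cast (List.mem_filter.mp hb).2)]
    rw [List.map_congr_left hcnt]
    exact sum_count_over_nodup _ _ hnd (fun x => by
      simp only [List.mem_filter, hS, PySem.List.mem_sorted, PySem.Set.mem_ofList,
        ← hperm.mem_iff])
  rw [hcounts, hov]
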